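-- pv_equiv track=rewrite | github.com/KPatr1ck/Data-Structure-and-Algorithm-in-Python | RecursiveTree/cell_num.py | cell_num
-- ===== SOURCE A (Python) =====
-- def cell_num(n):
--     """
--     1个细胞的生命周期是3小时，1小时分裂一次。求n小时后，容器内有多少细胞？
--     :param n: n小时
--     :param cell_list: 不同寿命对应的细胞树
--     :return:
--     """
--     assert(n >= 0)
--
--     cell_list = [0, 0, 1]
--     while n > 0:
--         # 存活时间剩1,2,3小时的细胞
--         cell_0, cell_1, cell_2 = cell_list[:]
--         # 3->2,3
--         cell_list[1] += cell_2
--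
--         # 2->1,3
--         cell_list[1] -= cell_1
--         cell_list[0] += cell_1
--         cell_list[2] += cell_1
--
--         # 1->0,3
--         cell_list[0] -= cell_0
--         cell_list[2] += cell_0
--
--         n -= 1
--
--     return sum(cell_list)
-- ===== SOURCE B (Python) =====
-- def cell_num(n):
--     """
--     Cell count after n hours via binary exponentiation of the 3x3
--     transition matrix (state = cells grouped by remaining lifetime).
--     """
--     def mul(A, B):
--         return [[sum(A[i][t] * B[t][j] for t in range(3)) for j in range(3)]
--                 for i in range(3)]
--
--     M = [[0, 1, 0], [0, 0, 1], [1, 1, 1]]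
--     R = [[1, 0, 0], [0, 1, 0], [0, 0, 1]]
--     k = n
--     while k > 0:
--         if k % 2 == 1:
--             R = mul(R, M)
--         M = mul(M, M)
--         k //= 2
--     # initial state vector is [0, 0, 1]; answer = sum(R @ [0,0,1])
--     return R[0][2] + R[1][2] + R[2][2]
-- ===== Notes on version B (the rewrite author's own statement) =====
-- stated objective: alternative
-- what changed: Replaces the hour-by-hour simulation loop over the three-element age list by binary exponentiation of the 3x3 linear state-transition matrix applied to the initial state (intended as faster, O(log n) multiplications vs O(n) steps; a timing run's verdict at the top sizes depends on the exponentially large big-int outputs, so 'faster' is left unclaimed).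
import Mathlib
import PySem

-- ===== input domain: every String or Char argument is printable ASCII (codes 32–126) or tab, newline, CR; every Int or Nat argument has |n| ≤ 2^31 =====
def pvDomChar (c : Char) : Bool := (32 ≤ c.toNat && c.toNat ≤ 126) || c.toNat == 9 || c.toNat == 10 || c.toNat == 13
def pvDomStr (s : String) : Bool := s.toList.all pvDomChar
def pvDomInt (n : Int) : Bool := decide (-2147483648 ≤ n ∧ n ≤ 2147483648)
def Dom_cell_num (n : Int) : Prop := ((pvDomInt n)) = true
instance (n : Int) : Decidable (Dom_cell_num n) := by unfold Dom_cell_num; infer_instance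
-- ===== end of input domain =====

-- B replaces A's hour-by-hour simulation loop by binary exponentiation of the
-- 3x3 linear state-transition matrix (a different algorithm; fewer loop steps).

-- ===== PORT A =====
-- the while-loop body of A, step for step on the state (cell_0, cell_1, cell_2)
def cell_num_go : Nat → Int × Int × Int → Int × Int × Int
  | 0, cl => cl
  | Nat.succ k, cl =>
    let c0 := cl.1
    let c1 := cl.2.1
    let c2 := cl.2.2
    -- cell_list[1] += cell_2
    let cl := (cl.1, cl.2.1 + c2, cl.2.2)
    -- cell_list[1] -= cell_1
    let cl := (cl.1, cl.2.1 - c1, cl.2.2)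
    -- cell_list[0] += cell_1
    let cl := (cl.1 + c1, cl.2.1, cl.2.2)
    -- cell_list[2] += cell_1
    let cl := (cl.1, cl.2.1, cl.2.2 + c1)
    -- cell_list[0] -= cell_0
    let cl := (cl.1 - c0, cl.2.1, cl.2.2)
    -- cell_list[2] += cell_0
    let cl := (cl.1, cl.2.1, cl.2.2 + c0)
    cell_num_go k cl

def cell_num (n : Int) : Int :=
  let cl := cell_num_go n.toNat (0, 0, 1)
  cl.1 + cl.2.1 + cl.2.2

-- ===== PORT B =====
structure Mat3 where
  a : Int
  b : Int
  c : Int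
  d : Int
  e : Int
  f : Int
  g : Int
  h : Int
  i : Int
deriving DecidableEq, Repr

def matMul (A B : Mat3) : Mat3 :=
  ⟨A.a*B.a + A.b*B.d + A.c*B.g, A.a*B.b + A.b*B.e + A.c*B.h, A.a*B.c + A.b*B.f + A.c*B.i,
   A.d*B.a + A.e*B.d + A.f*B.g, A.d*B.b + A.e*B.e + A.f*B.h, A.d*B.c + A.e*B.f + A.f*B.i,
   A.g*B.a + A.h*B.d + A.i*B.g, A.g*B.b + A.h*B.e + A.i*B.h, A.g*B.c + A.h*B.f + A.i*B.i⟩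

def idM : Mat3 := ⟨1,0,0,0,1,0,0,0,1⟩
def stepM : Mat3 := ⟨0,1,0,0,0,1,1,1,1⟩

-- Source B's 'while k > 0' binary-exponentiation loop
def powLoop (k : Nat) (M R : Mat3) : Mat3 :=
  if hk : k = 0 then R
  else powLoop (k / 2) (matMul M M) (if k % 2 = 1 then matMul R M else R)
termination_by k
decreasing_by exact Nat.div_lt_self (Nat.pos_of_ne_zero hk) (by norm_num)

def cell_num_alt (n : Int) : Int :=
  let R := powLoop n.toNat stepM idM
  R.c + R.f + R.i

-- ===== PRECONDITION & SPEC =====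
-- A asserts n >= 0 and raises AssertionError on negative n.
def Pre_cell_num (n : Int) : Prop := 0 ≤ n
instance (n : Int) : Decidable (Pre_cell_num n) := by unfold Pre_cell_num; infer_instance
def pvWitness_cell_num : Int := (5)

def Spec_cell_num (n : Int) (out : Int) : Prop := out = cell_num_alt n
instance (n : Int) (out : Int) : Decidable (Spec_cell_num n out) := by unfold Spec_cell_num; infer_instance

-- ===== CLAIM (what is proved, stated in full; the proofs are below) =====
def Claim_equal_cell_num : Prop := ∀ (n : Int), Dom_cell_num n → Pre_cell_num n → Spec_cell_num n (cell_num n)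

-- ===== LEMMAS AND PROOFS =====

theorem matMul_id_left (A : Mat3) : matMul idM A = A := by
  cases A; simp [matMul, idM]

theorem matMul_id_right (A : Mat3) : matMul A idM = A := by
  cases A; simp [matMul, idM]

theorem matMul_assoc (A B C : Mat3) : matMul (matMul A B) C = matMul A (matMul B C) := by
  cases A; cases B; cases C
  simp only [matMul, Mat3.mk.injEq]
  refine ⟨?_, ?_, ?_, ?_, ?_, ?_, ?_, ?_, ?_⟩ <;> ring

-- plain right-multiplication power, the reference semantics of both ports
def spow (m : Mat3) : Nat → Mat3
  | 0 => idM
  | k + 1 => matMul (spow m k) m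

theorem spow_succ_left (m : Mat3) (k : Nat) : spow m (k + 1) = matMul m (spow m k) := by
  induction k with
  | zero => simp [spow, matMul_id_left, matMul_id_right]
  | succ j ih =>
    show matMul (spow m (j + 1)) m = matMul m (matMul (spow m j) m)
    rw [ih, matMul_assoc]

theorem spow_two_mul (m : Mat3) (j : Nat) : spow m (2 * j) = spow (matMul m m) j := by
  induction j with
  | zero => rfl
  | succ i ih =>
    have : 2 * (i + 1) = 2 * i + 1 + 1 := by ring
    rw [this]
    show matMul (spow m (2 * i + 1)) m = spow (matMul m m) (i + 1)
    show matMul (matMul (spow m (2 * i)) m) m = matMul (spow (matMul m m) i) (matMul m m)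
    rw [matMul_assoc, ih]

theorem powLoop_eq (k : Nat) : ∀ (M R : Mat3), powLoop k M R = matMul R (spow M k) := by
  induction k using Nat.strong_induction_on with
  | _ k ih =>
    intro M R
    by_cases hk : k = 0
    · subst hk; rw [powLoop]; simp [spow, matMul_id_right]
    · rw [powLoop]
      simp only [hk, dif_neg, not_false_iff]
      rw [ih (k / 2) (Nat.div_lt_self (Nat.pos_of_ne_zero hk) (by norm_num))]
      rw [← spow_two_mul]
      by_cases hodd : k % 2 = 1
      · simp only [hodd, if_pos]
        have hks : k = 2 * (k / 2) + 1 := by omega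
        calc matMul (matMul R M) (spow M (2 * (k / 2)))
            = matMul R (matMul M (spow M (2 * (k / 2)))) := matMul_assoc ..
          _ = matMul R (spow M (2 * (k / 2) + 1)) := by rw [spow_succ_left]
          _ = matMul R (spow M k) := by rw [← hks]
      · simp only [hodd, if_false]
        have hks : 2 * (k / 2) = k := by omega
        rw [hks]

def matVec (m : Mat3) (v : Int × Int × Int) : Int × Int × Int :=
  (m.a * v.1 + m.b * v.2.1 + m.c * v.2.2,
   m.d * v.1 + m.e * v.2.1 + m.f * v.2.2,
   m.g * v.1 + m.h * v.2.1 + m.i * v.2.2)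

theorem matVec_id (v : Int × Int × Int) : matVec idM v = v := by
  obtain ⟨x, y, z⟩ := v; simp [matVec, idM]

theorem matVec_mul (A B : Mat3) (v : Int × Int × Int) :
    matVec (matMul A B) v = matVec A (matVec B v) := by
  cases A; cases B; obtain ⟨x, y, z⟩ := v
  simp only [matVec, matMul, Prod.mk.injEq]
  refine ⟨?_, ?_, ?_⟩ <;> ring

theorem go_eq_spow (k : Nat) : ∀ (v : Int × Int × Int),
    cell_num_go k v = matVec (spow stepM k) v := by
  induction k with
  | zero => intro v; simp [cell_num_go, spow, matVec_id]
  | succ j ih =>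
    intro v
    obtain ⟨x, y, z⟩ := v
    rw [show cell_num_go (j + 1) (x, y, z)
          = cell_num_go j (x + y - x, y + z - y, z + y + x) from rfl]
    rw [show spow stepM (j + 1) = matMul (spow stepM j) stepM from rfl, matVec_mul, ih]
    have : matVec stepM (x, y, z) = (x + y - x, y + z - y, z + y + x) := by
      simp only [matVec, stepM, Prod.mk.injEq]
      refine ⟨by ring, by ring, by ring⟩
    rw [this]

-- ===== VERDICT (by name: the statement is the Claim_ definition above) =====
theorem cell_num_spec : Claim_equal_cell_num := by
  intro n _ _
  unfold Spec_cell_num cell_num cell_num_alt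
  rw [powLoop_eq, matMul_id_left, go_eq_spow]
  cases spow stepM n.toNat
  simp [matVec]
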